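-- pv_equiv track=rewrite | github.com/Stopfield/Projetos2 | ShiftAndParcial.py | dicionario
-- ===== SOURCE A (Python) =====
-- palavra = 'lala'
--
-- def dicionario(palavra):  # função que cria um dicionario, com todas a s letras da palavra, e um lista com as ocorrencias delas
--     '''essa função analisa cada caractre da palavra e adiciona uma lsita com quais posições ela ocupa'''
--     mat = {}
--     for i in palavra:
--         ocorrencia = []
--         for j in palavra:  # ele pega um caractere da palavra a compara com todas as outras
--             if i == j:
--                 # as que forem iguais ele marca True na posição
--                 ocorrencia.append(True)
--             else:
--                 ocorrencia.append(False)  # se não ele marca false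
--         mat[i] = ocorrencia
--
--     return mat
-- ===== SOURCE B (Python) =====
-- def _posicoes(palavra):
--     '''one pass: occurrence index list per character, first-occurrence order'''
--     positions = {}
--     for i, ch in enumerate(palavra):
--         positions.setdefault(ch, []).append(i)
--     return positions
--
--
-- def _espalha(n, idxs):
--     '''scatter the indices into an all-False mask of length n'''
--     col = [False] * n
--     for i in idxs:
--         col[i] = True
--     return col
--
--
-- def dicionario(palavra):
--     '''collect each character's occurrence positions once, then scatter them
--     into boolean masks (no per-character rescan of the word)'''
--     mat = {}
--     for ch, idxs in _posicoes(palavra).items():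
--         mat[ch] = _espalha(len(palavra), idxs)
--     return mat
-- ===== Notes on version B (the rewrite author's own statement) =====
-- stated objective: faster
-- what changed: A compares every character with every character (a fresh full equality scan per position, overwriting dict entries); B makes one pass recording each character's occurrence indices, then scatters those indices into pre-allocated all-False masks, never re-scanning the word per character.
import Mathlib
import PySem

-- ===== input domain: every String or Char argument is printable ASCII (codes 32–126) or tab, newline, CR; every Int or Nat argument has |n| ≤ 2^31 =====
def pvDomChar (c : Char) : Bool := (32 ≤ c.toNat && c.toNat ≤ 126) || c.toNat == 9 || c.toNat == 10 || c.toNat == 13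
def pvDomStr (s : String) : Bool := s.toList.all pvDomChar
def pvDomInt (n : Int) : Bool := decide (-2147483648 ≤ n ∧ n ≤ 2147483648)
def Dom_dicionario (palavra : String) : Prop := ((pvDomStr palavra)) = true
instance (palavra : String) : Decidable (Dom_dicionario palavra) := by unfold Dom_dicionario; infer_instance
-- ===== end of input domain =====

-- B replaces A's all-pairs equality scan by one pass collecting occurrence indices
-- followed by a scatter into pre-allocated masks: asymptotically fewer comparisons.

-- ===== PORT A =====
def dicionario (palavra : String) : List (String × List Bool) :=
  (palavra.toList.foldl
    (fun (mat : PySem.Dict String (List Bool)) i =>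
      mat.insert (String.ofList [i])
        (palavra.toList.foldl
          (fun ocorrencia j =>
            if i == j then ocorrencia ++ [true] else ocorrencia ++ [false]) []))
    PySem.Dict.empty).items

-- ===== PORT B =====
-- B-side helpers (mirror Source B's _posicoes and _espalha):
-- 'positions.setdefault(ch, []).append(i)' is exactly 'modify key [] (· ++ [i])';
-- 'col[i] = True' is 'col.set i.toNat true' — exact here since every collected
-- index comes from enumerate and is ≥ 0 and < n.
def pvPosicoes (palavra : String) : PySem.Dict String (List Int) :=
  (PySem.List.enumerate palavra.toList 0).foldl
    (fun d p => d.modify (String.ofList [p.2]) [] (fun idxs => idxs ++ [p.1]))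
    PySem.Dict.empty

def pvEspalha (n : Nat) (idxs : List Int) : List Bool :=
  idxs.foldl (fun col i => col.set i.toNat true) (List.replicate n false)

def dicionario_alt (palavra : String) : List (String × List Bool) :=
  ((pvPosicoes palavra).items.foldl
    (fun (mat : PySem.Dict String (List Bool)) q =>
      mat.insert q.1 (pvEspalha palavra.toList.length q.2))
    PySem.Dict.empty).items

-- ===== PRECONDITION & SPEC =====
def Spec_dicionario (palavra : String) (out : List (String × List Bool)) : Prop := out = dicionario_alt palavra
instance (palavra : String) (out : List (String × List Bool)) : Decidable (Spec_dicionario palavra out) := by unfold Spec_dicionario; infer_instance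

-- ===== CLAIM (what is proved, stated in full; the proofs are below) =====
def Claim_equal_dicionario : Prop := ∀ (palavra : String), Dom_dicionario palavra → Spec_dicionario palavra (dicionario palavra)

-- ===== LEMMAS AND PROOFS =====

-- the common normal form both ports are reduced to
def pvCanon (l : List Char) : List (String × List Bool) :=
  (PySem.List.dedup l).map (fun c => (String.ofList [c], l.map (fun j => c == j)))

-- the char → single-char-string key used by both ports is injective
theorem pvKeyInj : Function.Injective (fun c : Char => String.ofList [c]) := by
  intro a b h
  have := congrArg String.toList h
  simpa using this

-- A's inner occurrence loop builds exactly the boolean equality column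
theorem pvInnerCol (i : Char) (l : List Char) :
    l.foldl (fun oc j => if i == j then oc ++ [true] else oc ++ [false]) []
      = l.map (fun j => i == j) := by
  have hstep : (fun (oc : List Bool) j => if i == j then oc ++ [true] else oc ++ [false])
      = fun oc j => oc ++ [i == j] := by
    funext oc j
    by_cases h : i == j <;> simp [h]
  rw [hstep]
  simpa using PySem.List.foldl_append_singleton_eq_map (fun j => i == j) l []

-- discard commutes with mapping an injective function
theorem pvDiscardMap (s : List Char) (x : Char) (f : Char → String)
    (hinj : Function.Injective f) :
    (PySem.Set.discard s x).map f = PySem.Set.discard (s.map f) (f x) := by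
  simp only [PySem.Set.discard, List.filter_map]
  exact congrArg (List.map f) (List.filter_congr (fun y _ => by simp [hinj.eq_iff])).symm

-- set(map f xs) = map f (set(xs)) for injective f
theorem pvOfListMap (l : List Char) (f : Char → String) (hinj : Function.Injective f) :
    PySem.Set.ofList (l.map f) = (PySem.Set.ofList l).map f := by
  induction l with
  | nil => simp [PySem.Set.ofList_nil]
  | cons x xs ih =>
    simp only [List.map_cons, PySem.Set.ofList_cons, ih, List.map]
    rw [pvDiscardMap _ _ _ hinj]

-- after a fold of key-determined inserts, the value at any processed key is its column
theorem pvGetDFold (v : Char → List Bool) :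
    ∀ (l : List Char) (d : PySem.Dict String (List Bool)) (c : Char),
      (c ∈ l ∨ d.getD (String.ofList [c]) [] = v c) →
      (l.foldl (fun d i => d.insert (String.ofList [i]) (v i)) d).getD
          (String.ofList [c]) [] = v c := by
  intro l
  induction l with
  | nil =>
    intro d c h
    simpa using h.resolve_left (by simp)
  | cons x xs ih =>
    intro d c h
    simp only [List.foldl_cons]
    apply ih
    by_cases hcx : c = x
    · right
      subst hcx
      simp [PySem.Dict.getD_insert_self]
    · rcases h with hmem | hval
      · rcases List.mem_cons.mp hmem with h1 | h1
        · exact absurd h1 hcx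
        · exact Or.inl h1
      · right
        rw [PySem.Dict.getD_insert, if_neg (fun e => hcx (pvKeyInj e))]
        exact hval

-- ===== A equals the normal form =====
theorem pvA_eq_canon (palavra : String) : dicionario palavra = pvCanon palavra.toList := by
  unfold dicionario pvCanon
  set l := palavra.toList with hl
  have hstep : (fun (mat : PySem.Dict String (List Bool)) i =>
        mat.insert (String.ofList [i])
          (l.foldl (fun oc j => if i == j then oc ++ [true] else oc ++ [false]) []))
      = fun mat i => mat.insert (String.ofList [i]) (l.map (fun j => i == j)) := by
    funext mat i
    rw [pvInnerCol]
  rw [hstep]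
  set D := l.foldl (fun (mat : PySem.Dict String (List Bool)) i =>
      mat.insert (String.ofList [i]) (l.map (fun j => i == j))) PySem.Dict.empty with hD
  have hnd : D.keys.Nodup := by
    rw [hD]
    exact PySem.Dict.nodup_keys_foldl_insert_key l (fun i => String.ofList [i]) _ _ (by simp)
  have hkeys : D.keys = (PySem.List.dedup l).map (fun c => String.ofList [c]) := by
    rw [hD, PySem.Dict.keys_foldl_insert_key]
    rw [show (PySem.Dict.empty : PySem.Dict String (List Bool)).keys = [] from rfl]
    rw [PySem.Set.update_nil_left]
    simpa using pvOfListMap l _ pvKeyInj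
  rw [PySem.Dict.items_eq_map_keys D hnd [], hkeys, List.map_map]
  apply List.map_congr_left
  intro c hc
  have hcl : c ∈ l := (PySem.List.mem_dedup l c).mp hc
  simp only [Function.comp]
  congr 1
  rw [hD]
  exact pvGetDFold (fun i => l.map (fun j => i == j)) l PySem.Dict.empty c (Or.inl hcl)

-- ===== B-side: the collected index list of a character =====
def pvIdxs (c : Char) (l : List Char) : List Int :=
  ((PySem.List.enumerate l 0).filter (fun p => p.2 == c)).map (·.1)

theorem pvMemIdxs (c : Char) (l : List Char) (x : Int) :
    x ∈ pvIdxs c l ↔ ∃ (k : Nat) (h : k < l.length), x = (k : Int) ∧ l[k] = c := by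
  unfold pvIdxs
  simp only [List.mem_map, List.mem_filter, PySem.List.mem_enumerate_iff]
  constructor
  · rintro ⟨p, ⟨⟨k, hk, rfl⟩, hpc⟩, rfl⟩
    exact ⟨k, hk, by simp, by simpa using hpc⟩
  · rintro ⟨k, hk, rfl, hlk⟩
    exact ⟨((0 : Int) + k, l[k]), ⟨⟨k, hk, rfl⟩, by simpa using hlk⟩, by simp⟩

theorem pvIdxsNonneg (c : Char) (l : List Char) : ∀ i ∈ pvIdxs c l, 0 ≤ i := by
  intro i hi
  rcases (pvMemIdxs c l i).mp hi with ⟨k, _, rfl, _⟩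
  exact Int.natCast_nonneg k

-- the positions dict's value at key c is pvIdxs c l
theorem pvPosGetD (palavra : String) (c : Char) :
    (pvPosicoes palavra).getD (String.ofList [c]) [] = pvIdxs c palavra.toList := by
  unfold pvPosicoes
  set l := palavra.toList with hl
  have hmap : (PySem.List.enumerate l 0).foldl
        (fun d p => d.modify (String.ofList [p.2]) [] (fun idxs => idxs ++ [p.1]))
        (PySem.Dict.empty : PySem.Dict String (List Int))
      = ((PySem.List.enumerate l 0).map (fun p => (String.ofList [p.2], p.1))).foldl
        (fun d p => d.modify p.1 [] (fun idxs => idxs ++ [p.2])) PySem.Dict.empty := by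
    rw [List.foldl_map]
  rw [hmap, PySem.Dict.getD_foldl_modify_append]
  simp only [PySem.Dict.getD_empty, List.nil_append, List.filter_map, List.map_map]
  unfold pvIdxs
  congr 1
  apply List.filter_congr
  intro p _
  simp only [Function.comp]
  by_cases h : p.2 = c
  · simp [h]
  · have h2 : String.ofList [p.2] ≠ String.ofList [c] := fun e => h (pvKeyInj e)
    simp [h, h2]

-- each cell of the scattered column: True exactly at collected (nonnegative) indices
theorem pvGetFold (idxs : List Int) (hpos : ∀ i ∈ idxs, 0 ≤ i) (col : List Bool) (k : Nat) :
    (idxs.foldl (fun col i => col.set i.toNat true) col)[k]?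
      = if (k : Int) ∈ idxs ∧ k < col.length then some true else col[k]? := by
  induction idxs generalizing col with
  | nil => simp
  | cons i t ih =>
    have hi : 0 ≤ i := hpos i (by simp)
    rw [List.foldl_cons, ih (fun j hj => hpos j (by simp [hj]))]
    rw [List.length_set, List.getElem?_set]
    by_cases hkl : k < col.length
    · by_cases hm : (k : Int) ∈ t
      · simp [hm, hkl]
      · by_cases hik : i = (k : Int)
        · have h1 : i.toNat = k := by omega
          simp [hm, hkl, hik]
        · have h1 : i.toNat ≠ k := by omega
          simp [hm, hkl, h1, Ne.symm hik]
    · have hnone : col[k]? = none := List.getElem?_eq_none (by omega)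
      by_cases h1 : i.toNat = k
      · simp [hkl, h1]
      · simp [hkl, h1]

-- the scattered mask is the equality column
theorem pvScatterEq (c : Char) (l : List Char) :
    pvEspalha l.length (pvIdxs c l) = l.map (fun j => c == j) := by
  unfold pvEspalha
  apply List.ext_getElem?
  intro k
  rw [pvGetFold _ (pvIdxsNonneg c l)]
  simp only [List.length_replicate, List.getElem?_map]
  by_cases hkl : k < l.length
  · by_cases hc : l[k] = c
    · have hm : (k : Int) ∈ pvIdxs c l := (pvMemIdxs c l _).mpr ⟨k, hkl, rfl, hc⟩
      have hbeq : (c == l[k]) = true := by simp [hc]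
      simp [hm, hkl, hbeq]
    · have hm : (k : Int) ∉ pvIdxs c l := by
        intro h
        rcases (pvMemIdxs c l _).mp h with ⟨m, hml, hmk, hlm⟩
        have : m = k := by omega
        exact hc (this ▸ hlm)
      have hbeq : ¬ ((c == l[k]) = true) := by
        simp only [beq_iff_eq]
        intro e
        exact hc e.symm
      simp [hm, hkl, hbeq]
  · have h1 : (List.replicate l.length false)[k]? = none :=
      List.getElem?_eq_none (by simpa using hkl)
    have h2 : (l.map (fun j => c == j))[k]? = none :=
      List.getElem?_eq_none (by simpa using hkl)
    have hm : (k : Int) ∉ pvIdxs c l := by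
      intro h
      rcases (pvMemIdxs c l _).mp h with ⟨m, hml, hmk, _⟩
      omega
    have h3 : l[k]? = none := List.getElem?_eq_none (by omega)
    simp [hm, h1, h3]

-- ===== B equals the normal form =====
theorem pvB_eq_canon (palavra : String) : dicionario_alt palavra = pvCanon palavra.toList := by
  unfold dicionario_alt pvCanon
  set l := palavra.toList with hl
  have hndP : (pvPosicoes palavra).keys.Nodup := by
    unfold pvPosicoes
    exact PySem.Dict.nodup_keys_foldl_modify_key (PySem.List.enumerate palavra.toList 0)
      (fun p => String.ofList [p.2]) [] (fun _ p => fun idxs => idxs ++ [p.1])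
      PySem.Dict.empty (by simp)
  have hkeysP : (pvPosicoes palavra).keys = (PySem.List.dedup l).map (fun c => String.ofList [c]) := by
    unfold pvPosicoes
    rw [PySem.Dict.keys_foldl_modify_key]
    rw [show (PySem.Dict.empty : PySem.Dict String (List Int)).keys = [] from rfl]
    rw [PySem.Set.update_nil_left]
    have : (PySem.List.enumerate l 0).map (fun p => String.ofList [p.2])
        = l.map (fun c => String.ofList [c]) := by
      rw [show (fun (p : Int × Char) => String.ofList [p.2])
            = (fun c => String.ofList [c]) ∘ (fun (p : Int × Char) => p.2) from rfl,
          ← List.map_map, PySem.List.map_snd_enumerate]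
    rw [this]
    simpa using pvOfListMap l _ pvKeyInj
  have hitemsP : (pvPosicoes palavra).items
      = (PySem.List.dedup l).map (fun c => (String.ofList [c], pvIdxs c l)) := by
    rw [PySem.Dict.items_eq_map_keys (pvPosicoes palavra) hndP [], hkeysP, List.map_map]
    apply List.map_congr_left
    intro c _
    simp only [Function.comp]
    rw [pvPosGetD]
  have hfresh : ((pvPosicoes palavra).items.foldl
      (fun (mat : PySem.Dict String (List Bool)) q =>
        mat.insert q.1 (pvEspalha l.length q.2)) PySem.Dict.empty).items
      = (pvPosicoes palavra).items.map (fun q => (q.1, pvEspalha l.length q.2)) := by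
    rw [PySem.Dict.items_foldl_insert_fresh (pvPosicoes palavra).items (fun q => q.1)
        (fun q => pvEspalha l.length q.2) PySem.Dict.empty
        (fun q _ => by simp)
        (by exact hndP)]
    simp [show (PySem.Dict.empty : PySem.Dict String (List Bool)).items = [] from rfl]
  rw [hfresh, hitemsP, List.map_map]
  apply List.map_congr_left
  intro c _
  simp only [Function.comp]
  rw [pvScatterEq]

-- ===== VERDICT (by name: the statement is the Claim_ definition above) =====
theorem dicionario_spec : Claim_equal_dicionario := by
  intro palavra _
  unfold Spec_dicionario
  rw [pvA_eq_canon, pvB_eq_canon]
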